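-- pv_equiv track=rewrite | github.com/cajomferro/shelley | shelley/automata/__init__.py | demultiplex
-- ===== SOURCE A (Python) =====
-- from typing import (
--     List,
--     Dict,
--     Iterable,
--     Tuple,
--     Any,
--     Optional,
--     Collection,
--     Mapping,
--     Set,
--     Iterator,
--     Callable,
--     AbstractSet,
--     Union,
--     cast,
--     TypeVar,
--     FrozenSet,
-- )
--
-- def demultiplex(seq: Iterable[str]) -> Mapping[str, List[str]]:
--     sequences: Dict[str, List[str]] = dict()
--     for msg in seq:
--         component, op = msg.split(".")
--         component_seq = sequences.get(component, None)
--         if component_seq is None: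
--             sequences[component] = component_seq = []
--         component_seq.append(op)
--     return sequences
-- ===== SOURCE B (Python) =====
-- def demultiplex(seq):
--     # Pass 1: strict two-way unpack of every message (preserves ValueError on malformed input).
--     pairs = []
--     for msg in seq:
--         component, op = msg.split(".")
--         pairs.append((component, op))
--     # Pass 2: for each first occurrence of a component, collect all its ops at once.
--     result = {}
--     for component, _ in pairs:
--         if component not in result:
--             result[component] = [op for c, op in pairs if c == component]
--     return result
-- ===== Notes on version B (the rewrite author's own statement) =====
-- stated objective: alternative
-- what changed: B replaces A's single-pass incremental dict of growing lists by a two-phase decomposition: extract all (component, op) pairs first, then build each component's complete list with one filter at its first occurrence.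
import Mathlib
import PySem

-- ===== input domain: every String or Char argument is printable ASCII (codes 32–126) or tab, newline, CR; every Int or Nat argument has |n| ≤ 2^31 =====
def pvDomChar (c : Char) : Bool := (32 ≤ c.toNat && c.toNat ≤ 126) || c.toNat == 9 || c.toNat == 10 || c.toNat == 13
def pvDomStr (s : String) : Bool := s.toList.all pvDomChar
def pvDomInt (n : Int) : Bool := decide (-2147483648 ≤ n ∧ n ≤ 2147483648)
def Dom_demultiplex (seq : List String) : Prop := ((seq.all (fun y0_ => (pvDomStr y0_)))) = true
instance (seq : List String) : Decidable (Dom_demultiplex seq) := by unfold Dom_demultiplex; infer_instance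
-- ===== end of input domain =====

-- B groups by a different decomposition (extract all pairs, then one filter per first occurrence of a
-- component) instead of A's single-pass dict of incrementally grown lists; equal return value on Pre_.

-- ===== PORT A =====
-- one-pass grouping: dict lookup, create-empty-on-miss, append op
def demultiplex (seq : List String) : List (String × List String) :=
  (seq.foldl (fun sequences msg =>
    match PySem.Str.split? msg "." with
    | some [component, op] =>
      match sequences.get? component with
      | none => sequences.insert component ([] ++ [op])       -- sequences[component] = []; then append
      | some componentSeq => sequences.insert component (componentSeq ++ [op])
    | _ => sequences                                           -- ValueError in Python: excluded by Pre_
    ) (PySem.Dict.empty : PySem.Dict String (List String))).items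

-- ===== PORT B =====
-- pass 1 of Source B: strict two-way unpack of every message into a pair list
def demultiplexAltPairs (seq : List String) : List (String × String) :=
  seq.foldl (fun pairs msg =>
    let parts := (PySem.Str.split? msg ".").getD []
    if parts.length = 2 then pairs ++ [(parts.getD 0 "", parts.getD 1 "")]
    else pairs                                                 -- ValueError in Python: excluded by Pre_
    ) []

-- pass 2 of Source B: at each component's first occurrence, collect all its ops with one filter
def demultiplex_alt (seq : List String) : List (String × List String) :=
  let pairs := demultiplexAltPairs seq
  (pairs.foldl (fun result p =>
    if result.contains p.1 then result
    else result.insert p.1 ((pairs.filter (fun q => q.1 == p.1)).map (fun q => q.2))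
    ) (PySem.Dict.empty : PySem.Dict String (List String))).items

-- ===== PRECONDITION & SPEC =====
-- Pre_ excludes exactly the messages without exactly one '.', on which A's strict unpack raises ValueError.
def Pre_demultiplex (seq : List String) : Prop :=
  ∀ msg ∈ seq, ((PySem.Str.split? msg ".").getD []).length = 2
instance (seq : List String) : Decidable (Pre_demultiplex seq) := by unfold Pre_demultiplex; infer_instance
def pvWitness_demultiplex : List String := ["a.b", "c.d", "a.e"]
def Spec_demultiplex (seq : List String) (out : List (String × List String)) : Prop := out = demultiplex_alt seq
instance (seq : List String) (out : List (String × List String)) : Decidable (Spec_demultiplex seq out) := by unfold Spec_demultiplex; infer_instance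

-- ===== CLAIM (what is proved, stated in full; the proofs are below) =====
def Claim_equal_demultiplex : Prop := ∀ (seq : List String), Dom_demultiplex seq → Pre_demultiplex seq → Spec_demultiplex seq (demultiplex seq)

-- ===== LEMMAS AND PROOFS =====

-- the (component, op) pairs of seq, as a flatMap (skipping malformed messages)
def pvPairs (seq : List String) : List (String × String) :=
  seq.flatMap (fun msg =>
    match PySem.Str.split? msg "." with
    | some [component, op] => [(component, op)]
    | _ => [])

theorem pvPairs_eq_foldl (seq : List String) (acc : List (String × String)) :
    seq.foldl (fun pairs msg =>
      let parts := (PySem.Str.split? msg ".").getD []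
      if parts.length = 2 then pairs ++ [(parts.getD 0 "", parts.getD 1 "")]
      else pairs) acc = acc ++ pvPairs seq := by
  induction seq generalizing acc with
  | nil => simp [pvPairs]
  | cons m rest ih =>
    simp only [List.foldl_cons, pvPairs, List.flatMap_cons]
    rcases h : PySem.Str.split? m "." with _ | l
    · simpa [h, pvPairs] using ih acc
    · match l with
      | [] => simpa [h, pvPairs] using ih acc
      | [c] => simpa [h, pvPairs] using ih acc
      | [c, o] => simpa [h, pvPairs] using ih (acc ++ [(c, o)])
      | c :: o :: x :: t => simpa [h, pvPairs] using ih acc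

-- A's fold over messages is the canonical modify-fold over the pairs
theorem demultiplex_fold_eq (seq : List String) (d : PySem.Dict String (List String)) :
    seq.foldl (fun sequences msg =>
      match PySem.Str.split? msg "." with
      | some [component, op] =>
        match sequences.get? component with
        | none => sequences.insert component ([] ++ [op])
        | some componentSeq => sequences.insert component (componentSeq ++ [op])
      | _ => sequences) d
    = (pvPairs seq).foldl (fun d p => d.modify p.1 [] (fun x => x ++ [p.2])) d := by
  induction seq generalizing d with
  | nil => simp [pvPairs]
  | cons m rest ih =>
    simp only [List.foldl_cons, pvPairs, List.flatMap_cons]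
    rcases h : PySem.Str.split? m "." with _ | l
    · simpa [h, pvPairs] using ih d
    · match l with
      | [] => simpa [h, pvPairs] using ih d
      | [c] => simpa [h, pvPairs] using ih d
      | [c, o] =>
        rcases hg : d.get? c with _ | v
        · simpa [hg, pvPairs, PySem.Dict.modify, PySem.Dict.getD_of_get?_eq_none d [] hg]
            using ih (d.modify c [] (fun x => x ++ [o]))
        · simpa [hg, pvPairs, PySem.Dict.modify, PySem.Dict.getD_of_get?_eq_some d [] hg]
            using ih (d.modify c [] (fun x => x ++ [o]))
      | c :: o :: x :: t => simpa [h, pvPairs] using ih d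

-- B's second fold: lookup characterisation (once a key is inserted its full value never changes)
theorem alt_fold_get? (V : String → List String) (l : List (String × String))
    (r : PySem.Dict String (List String)) (c : String) :
    (l.foldl (fun result p =>
      if result.contains p.1 then result else result.insert p.1 (V p.1)) r).get? c
    = if r.contains c then r.get? c
      else if c ∈ l.map (fun p => p.1) then some (V c) else none := by
  induction l generalizing r with
  | nil =>
    rcases h : r.contains c with _ | _
    · simp [(PySem.Dict.get?_eq_none_iff_contains r c).mpr h]
    · simp
  | cons p rest ih =>
    simp only [List.foldl_cons, List.map_cons, List.mem_cons]
    rcases hp : r.contains p.1 with _ | _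
    · -- fresh key: insert
      rw [if_neg (by simp), ih]
      by_cases hc : c = p.1
      · subst hc
        simp [PySem.Dict.get?_insert_self, hp]
      · by_cases hm : c ∈ List.map (fun p => p.1) rest <;>
          by_cases hrc : r.contains c = true <;>
            simp [PySem.Dict.contains_insert, PySem.Dict.get?_insert_of_ne, hc, hm, hrc]
    · -- key already present: skip
      rw [if_pos rfl, ih]
      by_cases hc : c = p.1
      · subst hc; simp [hp]
      · by_cases hm : c ∈ List.map (fun p => p.1) rest <;> simp [hc, hm]

-- B's second fold: keys are the distinct first components, in first-occurrence order
theorem alt_fold_keys (V : String → List String) (l : List (String × String))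
    (r : PySem.Dict String (List String)) :
    (l.foldl (fun result p =>
      if result.contains p.1 then result else result.insert p.1 (V p.1)) r).keys
    = PySem.Set.update r.keys (l.map (fun p => p.1)) := by
  induction l generalizing r with
  | nil => simp [PySem.Set.update]
  | cons p rest ih =>
    simp only [List.foldl_cons, List.map_cons, PySem.Set.update_cons]
    rcases hp : r.contains p.1 with _ | _
    · rw [if_neg (by simp), ih,
        PySem.Set.add_of_not_mem (by
          intro hmem
          exact absurd ((PySem.Dict.contains_iff_mem_keys r p.1).mpr hmem) (by simp [hp])),
        PySem.Dict.keys_insert_of_not_contains r (V p.1) hp]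
    · rw [if_pos rfl, ih,
        PySem.Set.add_of_mem ((PySem.Dict.contains_iff_mem_keys r p.1).mp hp)]

-- B's second fold keeps keys Nodup
theorem alt_fold_nodup (V : String → List String) (l : List (String × String))
    (r : PySem.Dict String (List String)) (h : r.keys.Nodup) :
    (l.foldl (fun result p =>
      if result.contains p.1 then result else result.insert p.1 (V p.1)) r).keys.Nodup := by
  induction l generalizing r with
  | nil => exact h
  | cons p rest ih =>
    simp only [List.foldl_cons]
    rcases hp : r.contains p.1 with _ | _
    · exact ih _ (by rw [if_neg (by simp)]; exact PySem.Dict.nodup_keys_insert _ _ _ h)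
    · exact ih _ (by rwa [if_pos rfl])

-- ===== VERDICT (by name: the statement is the Claim_ definition above) =====
theorem demultiplex_spec : Claim_equal_demultiplex := by
  intro seq _ _
  unfold Spec_demultiplex demultiplex demultiplex_alt demultiplexAltPairs
  rw [pvPairs_eq_foldl, List.nil_append, demultiplex_fold_eq]
  set ps := pvPairs seq with hps
  set V : String → List String :=
    fun c => (ps.filter (fun q => q.1 == c)).map (fun q => q.2) with hV
  have hkA : (ps.foldl (fun d p => d.modify p.1 [] (fun x => x ++ [p.2]))
      (PySem.Dict.empty : PySem.Dict String (List String))).keys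
      = PySem.Set.ofList (ps.map (fun p => p.1)) := by
    rw [PySem.Dict.keys_foldl_modify_key ps (fun p => p.1) [] (fun _ p x => x ++ [p.2])]
    simp [PySem.Set.update_nil_left]
  have hkB : (ps.foldl (fun result p =>
      if result.contains p.1 then result else result.insert p.1 (V p.1))
      (PySem.Dict.empty : PySem.Dict String (List String))).keys
      = PySem.Set.ofList (ps.map (fun p => p.1)) := by
    rw [alt_fold_keys]
    simp [PySem.Set.update_nil_left]
  have hndA := PySem.Dict.nodup_keys_foldl_modify_key ps (fun p => p.1) []
      (fun _ p x => x ++ [p.2]) (PySem.Dict.empty : PySem.Dict String (List String))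
      (by simp)
  have hndB := alt_fold_nodup V ps (PySem.Dict.empty : PySem.Dict String (List String))
      (by simp)
  rw [PySem.Dict.items_eq_map_keys _ hndA [], PySem.Dict.items_eq_map_keys _ hndB [],
    hkA, hkB]
  apply List.map_congr_left
  intro c hc
  have hcmem : c ∈ ps.map (fun p => p.1) := (PySem.Set.mem_ofList _ _).mp hc
  have hA : _ = _ := PySem.Dict.getD_foldl_modify_append ps
      (PySem.Dict.empty : PySem.Dict String (List String)) c
  rw [hA]
  have hB := alt_fold_get? V ps (PySem.Dict.empty : PySem.Dict String (List String)) c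
  rw [PySem.Dict.getD_eq_get?_getD
    (ps.foldl (fun result p =>
      if result.contains p.1 then result else result.insert p.1 (V p.1))
      (PySem.Dict.empty : PySem.Dict String (List String))) c [], hB]
  simp [PySem.Dict.contains_empty, hcmem, hV, PySem.Dict.getD_empty]
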